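-- pv_equiv track=rewrite | github.com/loansnap/regular | simple.py | cartesian
-- ===== SOURCE A (Python) =====
-- def cartesian(partials):
--     # Each 'partial' is a list of possible value maps for some subset of the symbols
--     # ex.: [[{'a':1},{'a':2}], [{'b':3},{'b':4}]] -> [{'a':1,'b':3},{'a':1,'b':4},{'a':2,'b':3},{'a':2,'b':4}]
--     if len(partials) == 0:
--         return []
--     if len(partials) == 1 and len(partials[0]) == 0:
--         # Annoying corner case, I should probably handle uniqueing earlier so it's not needed
--         return [{}]
--     if len(partials) == 1:
--         return partials[0]
--     if len(partials[0]) == 0: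
--         # This lets match_simple handle parts of the data which don't contain any relevant symbols.
--         # TODO: refactor so it doesn't need special handling. Will probably involve uniqueing  earlier.
--         return cartesian(partials[1:])
--
--     result = []
--     for remainder in cartesian(partials[1:]):
--         for candidate in partials[0]:
--             # If the two symbol sets have any symbols in common, then match on their values
--             # TODO: make this more efficient
--             common = set(remainder).intersection(candidate)
--             if {k: remainder[k] for k in common} != {k: candidate[k] for k in common}:
--                 continue
--
--             # The "cartesian" part
--             full = {k:v for k,v in remainder.items()}
--             full.update(candidate)
--             result.append(full)
--     return result
-- ===== SOURCE B (Python) =====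
-- def cartesian(partials):
--     # Iterative right-to-left fold instead of recursion; empty layers are
--     # normalized to [{}] up front, which removes A's special cases.
--     if not partials:
--         return []
--     maps = [layer if layer else [{}] for layer in partials]
--     acc = list(maps[-1])
--     for layer in reversed(maps[:-1]):
--         acc = [{**r, **c} for r in acc for c in layer
--                if all(c.get(k, v) == v for k, v in r.items())]
--     return acc
-- ===== Notes on version B (the rewrite author's own statement) =====
-- stated objective: simpler
-- what changed: Replaces A's recursion with three special-case branches by a single right-to-left fold over the layers after normalizing empty layers to [{}], and replaces the per-pair set-intersection/dict-comprehension consistency test by a short-circuiting all() over the remainder's items.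
import Mathlib
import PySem

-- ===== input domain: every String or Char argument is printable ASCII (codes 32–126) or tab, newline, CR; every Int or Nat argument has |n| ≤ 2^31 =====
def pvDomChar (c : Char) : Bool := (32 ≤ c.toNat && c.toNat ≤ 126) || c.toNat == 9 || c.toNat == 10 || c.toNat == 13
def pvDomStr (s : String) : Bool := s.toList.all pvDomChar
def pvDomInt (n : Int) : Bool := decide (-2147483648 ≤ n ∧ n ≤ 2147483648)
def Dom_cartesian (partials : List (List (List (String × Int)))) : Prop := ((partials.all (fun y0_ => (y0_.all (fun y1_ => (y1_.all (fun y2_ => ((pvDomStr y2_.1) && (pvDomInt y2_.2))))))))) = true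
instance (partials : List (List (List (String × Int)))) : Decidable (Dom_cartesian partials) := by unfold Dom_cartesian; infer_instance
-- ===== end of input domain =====

-- B replaces A's recursion and its three special cases by one right-to-left fold over the
-- layers with empty layers normalized to [{}] up front; objective: simpler (same result).

-- ===== PORT A =====
-- full = {k:v for k,v in remainder.items()}; full.update(candidate)
def pyUpdate (d : PySem.Dict String Int) (ps : List (String × Int)) : PySem.Dict String Int :=
  ps.foldl (fun d kv => d.insert kv.1 kv.2) d

def cartesian : List (List (List (String × Int))) → List (List (String × Int))
  | [] => []
  | p0 :: rest =>
    if rest = [] then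
      if p0 = [] then [[]] else p0
    else if p0 = [] then cartesian rest
    else
      (cartesian rest).foldl (fun result remainder =>
        p0.foldl (fun result candidate =>
          -- common = set(remainder).intersection(candidate)
          let common := PySem.Set.inter (PySem.Set.ofList (PySem.Dict.keys ⟨remainder⟩))
                          (PySem.Dict.keys ⟨candidate⟩)
          -- the comprehension comparison is Python dict `==` (order-insensitive); both
          -- comprehensions have key list `common`, so it is pointwise value equality on `common`
          if common.all (fun k => PySem.Dict.get? (⟨remainder⟩ : PySem.Dict String Int) k
                                    == PySem.Dict.get? (⟨candidate⟩ : PySem.Dict String Int) k) then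
            result ++ [(pyUpdate ⟨remainder⟩ candidate).items]
          else result) result) []

-- ===== PORT B =====
-- all(c.get(k, v) == v for k, v in r.items())
def consistent (r c : List (String × Int)) : Bool :=
  r.all (fun kv => PySem.Dict.getD (⟨c⟩ : PySem.Dict String Int) kv.1 kv.2 == kv.2)

-- {**r, **c}
def mergeMaps (r c : List (String × Int)) : List (String × Int) :=
  (c.foldl (fun d kv => d.insert kv.1 kv.2) (⟨r⟩ : PySem.Dict String Int)).items

def cartesian_alt : List (List (List (String × Int))) → List (List (String × Int))
  | [] => []
  | p0 :: rest =>
    let maps := (p0 :: rest).map (fun layer => if layer = [] then [[]] else layer)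
    (maps.dropLast.reverse).foldl
      (fun acc layer =>
        acc.flatMap (fun r => (layer.filter (fun c => consistent r c)).map (fun c => mergeMaps r c)))
      (maps.getLastD [])   -- maps[-1]; maps is nonempty, so the default is never used

-- ===== PRECONDITION & SPEC =====
-- Pre_ admits exactly the association lists that represent Python dicts (no duplicate keys);
-- every input A's Python can receive satisfies it (a Python dict cannot have duplicate keys).
def Pre_cartesian (partials : List (List (List (String × Int)))) : Prop :=
  ∀ layer ∈ partials, ∀ d ∈ layer, (d.map Prod.fst).Nodup
instance (partials : List (List (List (String × Int)))) : Decidable (Pre_cartesian partials) := by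
  unfold Pre_cartesian; infer_instance

def pvWitness_cartesian : (List (List (List (String × Int)))) :=
  [[[("a", 1)], [("a", 2)]], [[("b", 3)], [("b", 4)]]]

def Spec_cartesian (partials : List (List (List (String × Int)))) (out : List (List (String × Int))) : Prop := out = cartesian_alt partials
instance (partials : List (List (List (String × Int)))) (out : List (List (String × Int))) : Decidable (Spec_cartesian partials out) := by unfold Spec_cartesian; infer_instance

-- ===== CLAIM (what is proved, stated in full; the proofs are below) =====
def Claim_equal_cartesian : Prop := ∀ (partials : List (List (List (String × Int)))), Dom_cartesian partials → Pre_cartesian partials → Spec_cartesian partials (cartesian partials)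

-- ===== LEMMAS AND PROOFS =====

-- the normalized layer list and the join both ports reduce to
def normLayers (l : List (List (List (String × Int)))) : List (List (List (String × Int))) :=
  l.map (fun layer => if layer = [] then [[]] else layer)

def joinB (layer : List (List (String × Int))) (acc : List (List (String × Int))) :
    List (List (String × Int)) :=
  acc.flatMap (fun r => (layer.filter (fun c => consistent r c)).map (fun c => mergeMaps r c))

def chain : List (List (List (String × Int))) → List (List (String × Int))
  | [] => [[]]
  | m :: ms => joinB m (chain ms)

theorem mergeMaps_nil_right (r : List (String × Int)) : mergeMaps r [] = r := rfl

theorem consistent_nil_right (r : List (String × Int)) : consistent r [] = true := by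
  unfold consistent
  simp [PySem.Dict.getD, PySem.Dict.get?]

theorem consistent_nil_left (c : List (String × Int)) : consistent [] c = true := rfl

theorem mergeMaps_nil_left (c : List (String × Int)) (h : (c.map Prod.fst).Nodup) :
    mergeMaps [] c = c := by
  unfold mergeMaps
  have hfresh : ∀ a ∈ c, PySem.Dict.contains (⟨[]⟩ : PySem.Dict String Int) (Prod.fst a) = false := by
    intro a _; rfl
  simpa using PySem.Dict.items_foldl_insert_fresh c Prod.fst Prod.snd ⟨[]⟩ hfresh h

theorem nodup_mergeMaps (r c : List (String × Int)) (h : (r.map Prod.fst).Nodup) :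
    ((mergeMaps r c).map Prod.fst).Nodup := by
  have h' : (PySem.Dict.keys (⟨r⟩ : PySem.Dict String Int)).Nodup := by
    simpa [PySem.Dict.keys] using h
  simpa [mergeMaps, PySem.Dict.keys] using
    PySem.Dict.nodup_keys_foldl_insert_key c Prod.fst (fun _ kv => kv.2) ⟨r⟩ h'

theorem get?_mk_of_mem (r : List (String × Int)) (k : String) (v : Int)
    (h : (r.map Prod.fst).Nodup) (hm : (k, v) ∈ r) :
    PySem.Dict.get? (⟨r⟩ : PySem.Dict String Int) k = some v := by
  induction r with
  | nil => simp at hm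
  | cons a r ih =>
    simp only [List.map_cons, List.nodup_cons] at h
    rcases List.mem_cons.mp hm with heq | hm'
    · rw [← heq]
      simp [PySem.Dict.get?]
    · have hk : (a.1 == k) = false := by
        have hkmem : k ∈ r.map Prod.fst := List.mem_map_of_mem (f := Prod.fst) hm'
        simp only [beq_eq_false_iff_ne, ne_eq]
        intro e; exact h.1 (e ▸ hkmem)
      simpa [PySem.Dict.get?, List.find?_cons, hk] using ih h.2 hm'

theorem cond_eq (r c : List (String × Int)) (h : (r.map Prod.fst).Nodup) :
    ((PySem.Set.inter (PySem.Set.ofList (PySem.Dict.keys ⟨r⟩)) (PySem.Dict.keys ⟨c⟩)).all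
      (fun k => PySem.Dict.get? (⟨r⟩ : PySem.Dict String Int) k
                  == PySem.Dict.get? (⟨c⟩ : PySem.Dict String Int) k)) = consistent r c := by
  unfold consistent
  rw [show PySem.Set.ofList (PySem.Dict.keys (⟨r⟩ : PySem.Dict String Int)) = r.map Prod.fst from
    PySem.Set.ofList_eq_self_of_nodup _ h]
  rw [Bool.eq_iff_iff]
  simp only [PySem.Set.inter, PySem.Set.contains, List.all_eq_true, List.mem_filter,
    List.mem_map]
  constructor
  · intro H kv hkv
    obtain ⟨k0, v0⟩ := kv
    have hget := get?_mk_of_mem r k0 v0 h hkv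
    cases hopt : PySem.Dict.get? (⟨c⟩ : PySem.Dict String Int) k0 with
    | none => simp [PySem.Dict.getD, hopt]
    | some w =>
      have hmem : k0 ∈ PySem.Dict.keys (⟨c⟩ : PySem.Dict String Int) := by
        by_contra hn
        simp [(PySem.Dict.get?_eq_none_iff_not_mem_keys _ _).mpr hn] at hopt
      have h2 := H k0 ⟨⟨(k0, v0), hkv, rfl⟩, by simpa using hmem⟩
      rw [hget, hopt] at h2
      simp only [beq_iff_eq, Option.some.injEq] at h2
      simp [PySem.Dict.getD, hopt, h2]
  · intro H k0 hk0
    obtain ⟨⟨⟨k1, v0⟩, hkv, rfl⟩, hcont⟩ := hk0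
    have hget := get?_mk_of_mem r k1 v0 h hkv
    have h2 := H (k1, v0) hkv
    cases hopt : PySem.Dict.get? (⟨c⟩ : PySem.Dict String Int) k1 with
    | none =>
      exact absurd ((PySem.Dict.get?_eq_none_iff_not_mem_keys _ _).mp hopt)
        (by simpa using hcont)
    | some w =>
      simp only [PySem.Dict.getD, hopt, Option.getD_some, beq_iff_eq] at h2
      simp [hget, h2]

theorem chain_nodup (l : List (List (List (String × Int))))
    (h : ∀ layer ∈ l, ∀ d ∈ layer, (d.map Prod.fst).Nodup) :
    ∀ r ∈ chain l, (r.map Prod.fst).Nodup := by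
  induction l with
  | nil =>
    intro r hr
    simp only [chain, List.mem_singleton] at hr
    subst hr; simp
  | cons m ms ih =>
    intro r hr
    simp only [chain, joinB, List.mem_flatMap, List.mem_map, List.mem_filter] at hr
    obtain ⟨r', hr', c, ⟨hc, _⟩, rfl⟩ := hr
    exact nodup_mergeMaps _ _ (ih (fun layer hl => h layer (List.mem_cons_of_mem _ hl)) r' hr')

theorem pre_normLayers (l : List (List (List (String × Int))))
    (h : ∀ layer ∈ l, ∀ d ∈ layer, (d.map Prod.fst).Nodup) :
    ∀ layer ∈ normLayers l, ∀ d ∈ layer, (d.map Prod.fst).Nodup := by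
  intro layer hl
  simp only [normLayers, List.mem_map] at hl
  obtain ⟨l0, hl0, rfl⟩ := hl
  by_cases he : l0 = []
  · rw [if_pos he]
    intro d hd
    simp only [List.mem_singleton] at hd
    subst hd; simp
  · rw [if_neg he]
    exact h l0 hl0

theorem joinB_singleton_empty (acc : List (List (String × Int))) :
    joinB [[]] acc = acc := by
  unfold joinB
  simp [consistent_nil_right, mergeMaps_nil_right]

theorem joinB_base (m : List (List (String × Int))) (h : ∀ d ∈ m, (d.map Prod.fst).Nodup) :
    joinB m [[]] = m := by
  unfold joinB
  rw [List.flatMap_singleton]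
  rw [List.filter_eq_self.mpr (fun c _ => consistent_nil_left c)]
  rw [List.map_congr_left (fun c hc => mergeMaps_nil_left c (h c hc))]
  exact List.map_id m

theorem cartesian_eq_chain (partials : List (List (List (String × Int))))
    (hne : partials ≠ []) (h : Pre_cartesian partials) :
    cartesian partials = chain (normLayers partials) := by
  induction partials with
  | nil => exact absurd rfl hne
  | cons p0 rest ih =>
    have hp0 : ∀ d ∈ p0, (d.map Prod.fst).Nodup := h p0 (by simp)
    have hrestPre : Pre_cartesian rest := fun layer hl => h layer (List.mem_cons_of_mem _ hl)
    by_cases hr0 : rest = []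
    · subst hr0
      by_cases hp0e : p0 = []
      · subst hp0e
        simp [cartesian, normLayers, chain, joinB_singleton_empty]
      · simp only [cartesian, normLayers, List.map_cons, List.map_nil, if_neg hp0e, chain]
        exact (joinB_base p0 hp0).symm
    · by_cases hp0e : p0 = []
      · subst hp0e
        have hstep : cartesian ([] :: rest) = cartesian rest := by
          simp [cartesian, hr0]
        rw [hstep, ih hr0 hrestPre]
        have hnorm : normLayers ([] :: rest) = [[]] :: normLayers rest := by
          simp [normLayers]
        rw [hnorm]
        simp only [chain]
        exact (joinB_singleton_empty _).symm
      · simp only [cartesian, if_neg hr0, if_neg hp0e]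
        simp only [PySem.List.foldl_append_if]
        simp only [PySem.List.foldl_append_eq_flatMap, List.nil_append]
        rw [ih hr0 hrestPre]
        have hnorm : normLayers (p0 :: rest) = p0 :: normLayers rest := by
          simp [normLayers, hp0e]
        rw [hnorm]
        simp only [chain]
        unfold joinB
        apply List.flatMap_congr
        intro r hrmem
        have hnd : (r.map Prod.fst).Nodup :=
          chain_nodup _ (pre_normLayers _ hrestPre) r hrmem
        rw [List.filter_congr (fun c _ => cond_eq r c hnd)]
        rfl

theorem revfold_chain (ms : List (List (List (String × Int)))) (m : List (List (String × Int)))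
    (h : ∀ layer ∈ ms ++ [m], ∀ d ∈ layer, (d.map Prod.fst).Nodup) :
    ms.foldr (fun layer acc => joinB layer acc) m = chain (ms ++ [m]) := by
  induction ms with
  | nil =>
    simp only [List.nil_append, List.foldr_nil, chain]
    exact (joinB_base m (fun d hd => h m (by simp) d hd)).symm
  | cons m0 ms ih =>
    simp only [List.cons_append, List.foldr_cons, chain]
    rw [ih (fun layer hl => h layer (List.mem_cons_of_mem _ hl))]

theorem alt_eq_chain (partials : List (List (List (String × Int))))
    (hne : partials ≠ []) (h : Pre_cartesian partials) :
    cartesian_alt partials = chain (normLayers partials) := by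
  cases partials with
  | nil => exact absurd rfl hne
  | cons p0 rest =>
    have hmapsne : ((p0 :: rest).map (fun layer => if layer = [] then [[]] else layer)) ≠ [] := by
      simp
    obtain ⟨ms, m, hms⟩ :
        ∃ ms m, (p0 :: rest).map (fun layer => if layer = [] then [[]] else layer) = ms ++ [m] :=
      ⟨_, _, (List.dropLast_append_getLast hmapsne).symm⟩
    have hnorm : normLayers (p0 :: rest) = ms ++ [m] := hms
    have hpre : ∀ layer ∈ ms ++ [m], ∀ d ∈ layer, (d.map Prod.fst).Nodup := by
      have := pre_normLayers _ h
      rw [hnorm] at this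
      exact this
    simp only [cartesian_alt]
    rw [hms, List.dropLast_concat, List.getLastD_concat, List.foldl_reverse, hnorm]
    exact revfold_chain ms m hpre

-- ===== VERDICT (by name: the statement is the Claim_ definition above) =====
theorem cartesian_spec : Claim_equal_cartesian := by
  intro partials _hdom hpre
  unfold Spec_cartesian
  cases partials with
  | nil => rfl
  | cons p0 rest =>
    rw [cartesian_eq_chain _ (by simp) hpre, alt_eq_chain _ (by simp) hpre]
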